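-- pv_equiv track=rewrite | github.com/Hamzx-code/a-maze-ing | algorithms/a_star.py | get_accessible_neighbors
-- ===== SOURCE A (Python) =====
-- NORTH = 0b0001
--
-- EAST = 0b0010
--
-- SOUTH = 0b0100
--
-- WEST = 0b1000
--
-- def can_move(grid: list[list[int]], cell: tuple[int, int],
--              neighbor: tuple[int, int]) -> bool:
--     cx, cy = cell
--     nx, ny = neighbor
--
--     if ny == cy + 1:
--         return not (grid[cy][cx] & SOUTH)
--     elif ny == cy - 1:
--         return not (grid[cy][cx] & NORTH)
--     elif nx == cx + 1:
--         return not (grid[cy][cx] & EAST)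
--     elif nx == cx - 1:
--         return not (grid[cy][cx] & WEST)
--     else:
--         return False
--
-- def get_accessible_neighbors(grid: list[list[int]], cell: tuple[int, int],
--                              width: int, height: int) -> list[tuple[int, int]]:
--     x, y = cell
--     neighbors = []
--     if x > 0:
--         neighbors.append((x - 1, y))
--     if x < width - 1:
--         neighbors.append((x + 1, y))
--     if y > 0:
--         neighbors.append((x, y - 1))
--     if y < height - 1:
--         neighbors.append((x, y + 1))
--
--     return [neighbor
--             for neighbor in neighbors
--             if can_move(grid, cell, neighbor)]
-- ===== SOURCE B (Python) =====
-- NORTH = 0b0001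
-- EAST = 0b0010
-- SOUTH = 0b0100
-- WEST = 0b1000
--
-- _DIRS = [((-1, 0), WEST), ((1, 0), EAST), ((0, -1), NORTH), ((0, 1), SOUTH)]
-- # _OPEN[m] = deltas of the directions whose bit is set in m, in W,E,N,S order.
-- _OPEN = [[d for d, bit in _DIRS if m & bit] for m in range(16)]
--
-- def get_accessible_neighbors(grid, cell, width, height):
--     x, y = cell
--     bounds = ((x > 0) << 3) | ((x < width - 1) << 1) | (y > 0) | ((y < height - 1) << 2)
--     if not bounds:
--         return []
--     mask = bounds & ~grid[y][x]
--     return [(x + dx, y + dy) for dx, dy in _OPEN[mask]]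
-- ===== Notes on version B (the rewrite author's own statement) =====
-- stated objective: alternative
-- what changed: Replaces A's candidate-list build plus per-neighbor filtering through the coordinate-delta dispatch helper can_move (four reads of grid[y][x]) by computing one combined bitmask bounds & ~grid[y][x] and indexing a precomputed 16-entry table of direction-delta lists.
import Mathlib
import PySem

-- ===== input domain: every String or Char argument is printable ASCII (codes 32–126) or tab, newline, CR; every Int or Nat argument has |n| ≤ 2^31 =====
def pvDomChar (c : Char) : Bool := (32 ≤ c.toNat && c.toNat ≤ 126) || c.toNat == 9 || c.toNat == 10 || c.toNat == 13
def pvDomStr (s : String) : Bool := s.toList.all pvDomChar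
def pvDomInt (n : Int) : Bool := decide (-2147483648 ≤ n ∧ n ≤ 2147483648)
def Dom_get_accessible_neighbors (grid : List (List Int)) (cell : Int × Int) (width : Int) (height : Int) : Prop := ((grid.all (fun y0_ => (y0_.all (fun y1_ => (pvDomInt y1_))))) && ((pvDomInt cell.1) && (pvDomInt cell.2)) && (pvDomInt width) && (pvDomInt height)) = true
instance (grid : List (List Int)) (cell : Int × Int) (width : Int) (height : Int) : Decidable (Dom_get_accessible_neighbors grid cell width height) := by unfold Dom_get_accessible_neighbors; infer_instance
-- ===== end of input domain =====

-- B replaces A's candidate-build-then-filter (whose helper can_move re-reads grid[y][x]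
-- per neighbor) by one combined bitmask bounds & ~grid[y][x] indexing a precomputed
-- 16-entry table of direction-delta lists (objective: alternative).

-- ===== PORT A =====
-- grid[cy][cx] with Python indexing; `.getD 0` is only reached outside Pre_ (Python raises there).
def pvCanMove (grid : List (List Int)) (cell : Int × Int) (neighbor : Int × Int) : Bool :=
  let cx := cell.1; let cy := cell.2
  let nx := neighbor.1; let ny := neighbor.2
  let v : Int := (((PySem.List.pyGet? grid cy).bind (fun row => PySem.List.pyGet? row cx)).getD 0)
  if ny = cy + 1 then PySem.Int.band v 4 == 0
  else if ny = cy - 1 then PySem.Int.band v 1 == 0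
  else if nx = cx + 1 then PySem.Int.band v 2 == 0
  else if nx = cx - 1 then PySem.Int.band v 8 == 0
  else false

def get_accessible_neighbors (grid : List (List Int)) (cell : Int × Int) (width : Int) (height : Int) : List (Int × Int) :=
  let x := cell.1; let y := cell.2
  let neighbors : List (Int × Int) := []
  let neighbors := if x > 0 then neighbors ++ [(x - 1, y)] else neighbors
  let neighbors := if x < width - 1 then neighbors ++ [(x + 1, y)] else neighbors
  let neighbors := if y > 0 then neighbors ++ [(x, y - 1)] else neighbors
  let neighbors := if y < height - 1 then neighbors ++ [(x, y + 1)] else neighbors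
  neighbors.filter (fun neighbor => pvCanMove grid cell neighbor)

-- ===== PORT B =====
-- _DIRS / _OPEN: the module-level precomputed table of Source B.
def pvDirs : List ((Int × Int) × Int) := [((-1, 0), 8), ((1, 0), 2), ((0, -1), 1), ((0, 1), 4)]
def pvOpen : List (List (Int × Int)) :=
  (List.range 16).map (fun m =>
    (pvDirs.filter (fun p => PySem.Int.band (m : Int) p.2 != 0)).map (fun p => p.1))

def get_accessible_neighbors_alt (grid : List (List Int)) (cell : Int × Int) (width : Int) (height : Int) : List (Int × Int) :=
  let x := cell.1; let y := cell.2
  let bounds : Int :=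
    PySem.Int.bor (PySem.Int.bor (PySem.Int.bor
      ((if x > 0 then (1:Int) else 0) <<< 3)
      ((if x < width - 1 then (1:Int) else 0) <<< 1))
      (if y > 0 then (1:Int) else 0))
      ((if y < height - 1 then (1:Int) else 0) <<< 2)
  if bounds = 0 then []
  else
    let mask : Int := PySem.Int.band bounds
      (Int.not (((PySem.List.pyGet? grid y).bind (fun row => PySem.List.pyGet? row x)).getD 0))
    ((PySem.List.pyGet? pvOpen mask).getD []).map (fun d => (x + d.1, y + d.2))

-- ===== PRECONDITION & SPEC =====
-- Pre_ excludes exactly the inputs where Python A raises IndexError: some in-bounds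
-- direction exists (so grid[y][x] is evaluated) but the Python lookup fails.
def Pre_get_accessible_neighbors (grid : List (List Int)) (cell : Int × Int) (width : Int) (height : Int) : Prop :=
  (cell.1 > 0 ∨ cell.1 < width - 1 ∨ cell.2 > 0 ∨ cell.2 < height - 1) →
    ((PySem.List.pyGet? grid cell.2).bind (fun row => PySem.List.pyGet? row cell.1)) ≠ none
instance (grid : List (List Int)) (cell : Int × Int) (width : Int) (height : Int) : Decidable (Pre_get_accessible_neighbors grid cell width height) := by unfold Pre_get_accessible_neighbors; infer_instance

def pvWitness_get_accessible_neighbors : List (List Int) × (Int × Int) × Int × Int :=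
  ([[2, 8], [1, 4]], (0, 0), 2, 2)

def Spec_get_accessible_neighbors (grid : List (List Int)) (cell : Int × Int) (width : Int) (height : Int) (out : List (Int × Int)) : Prop := out = get_accessible_neighbors_alt grid cell width height
instance (grid : List (List Int)) (cell : Int × Int) (width : Int) (height : Int) (out : List (Int × Int)) : Decidable (Spec_get_accessible_neighbors grid cell width height out) := by unfold Spec_get_accessible_neighbors; infer_instance

-- ===== CLAIM (what is proved, stated in full; the proofs are below) =====
def Claim_equal_get_accessible_neighbors : Prop := ∀ (grid : List (List Int)) (cell : Int × Int) (width : Int) (height : Int), Dom_get_accessible_neighbors grid cell width height → Pre_get_accessible_neighbors grid cell width height → Spec_get_accessible_neighbors grid cell width height (get_accessible_neighbors grid cell width height)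

-- ===== LEMMAS AND PROOFS =====

def pvWall (grid : List (List Int)) (x y : Int) : Int :=
  ((PySem.List.pyGet? grid y).bind (fun row => PySem.List.pyGet? row x)).getD 0

lemma pv_ifapp {α : Type} (c : Prop) [Decidable c] (l : List α) (e : α) :
    (if c then l ++ [e] else l) = l ++ (if c then [e] else []) := by
  split_ifs <;> simp

lemma pv_filt_if {α : Type} (c : Prop) [Decidable c] (f : α → Bool) (e : α) :
    List.filter f (if c then [e] else []) = (if c then (if f e then [e] else []) else []) := by
  split_ifs <;> simp_all

lemma pvCanMove_west (grid : List (List Int)) (x y : Int) :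
    pvCanMove grid (x, y) (x - 1, y) = (PySem.Int.band (pvWall grid x y) 8 == 0) := by
  simp only [pvCanMove, pvWall]
  rw [if_neg (by omega), if_neg (by omega), if_neg (by omega)]; simp

lemma pvCanMove_east (grid : List (List Int)) (x y : Int) :
    pvCanMove grid (x, y) (x + 1, y) = (PySem.Int.band (pvWall grid x y) 2 == 0) := by
  simp only [pvCanMove, pvWall]
  rw [if_neg (by omega), if_neg (by omega)]; simp

lemma pvCanMove_north (grid : List (List Int)) (x y : Int) :
    pvCanMove grid (x, y) (x, y - 1) = (PySem.Int.band (pvWall grid x y) 1 == 0) := by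
  simp only [pvCanMove, pvWall]
  rw [if_neg (by omega)]; simp

lemma pvCanMove_south (grid : List (List Int)) (x y : Int) :
    pvCanMove grid (x, y) (x, y + 1) = (PySem.Int.band (pvWall grid x y) 4 == 0) := by
  simp only [pvCanMove, pvWall]; simp

lemma pv_A_char (grid : List (List Int)) (x y width height : Int) :
    get_accessible_neighbors grid (x, y) width height =
      (if x > 0 then (if PySem.Int.band (pvWall grid x y) 8 == 0 then [(x - 1, y)] else []) else [])
      ++ (if x < width - 1 then (if PySem.Int.band (pvWall grid x y) 2 == 0 then [(x + 1, y)] else []) else [])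
      ++ (if y > 0 then (if PySem.Int.band (pvWall grid x y) 1 == 0 then [(x, y - 1)] else []) else [])
      ++ (if y < height - 1 then (if PySem.Int.band (pvWall grid x y) 4 == 0 then [(x, y + 1)] else []) else []) := by
  unfold get_accessible_neighbors
  simp only [pv_ifapp, List.nil_append, List.filter_append, pv_filt_if,
    pvCanMove_west, pvCanMove_east, pvCanMove_north, pvCanMove_south]

lemma pv_open_sum (c1 c2 c4 c8 : Bool) (B : Int) (h0 : 0 ≤ B) (hB : B < 16) :
    (PySem.List.pyGet? pvOpen
        ((if c1 then PySem.Int.band B 1 else 0) + (if c2 then PySem.Int.band B 2 else 0)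
          + (if c4 then PySem.Int.band B 4 else 0) + (if c8 then PySem.Int.band B 8 else 0))).getD []
      = (if c8 && (PySem.Int.band B 8 == 8) then [((-1 : Int), (0 : Int))] else [])
        ++ (if c2 && (PySem.Int.band B 2 == 2) then [((1 : Int), (0 : Int))] else [])
        ++ (if c1 && (PySem.Int.band B 1 == 1) then [((0 : Int), (-1 : Int))] else [])
        ++ (if c4 && (PySem.Int.band B 4 == 4) then [((0 : Int), (1 : Int))] else []) := by
  obtain ⟨b, rfl⟩ : ∃ b : Nat, B = (b : Int) := ⟨B.toNat, (Int.toNat_of_nonneg h0).symm⟩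
  have hb : b < 16 := by exact_mod_cast hB
  interval_cases b <;> cases c1 <;> cases c2 <;> cases c4 <;> cases c8 <;> decide


lemma pv_and_small (c n : Nat) (hc : c < 16) : c &&& n = c &&& (n % 16) := by
  have h15 : ∀ m : Nat, m < 16 → m &&& 15 = m := by
    intro m hm
    have h := Nat.and_two_pow_sub_one_eq_mod m 4
    norm_num at h
    rw [h, Nat.mod_eq_of_lt hm]
  have hmod : n % 16 = n &&& 15 := by
    have h := Nat.and_two_pow_sub_one_eq_mod n 4
    norm_num at h; omega
  rw [hmod, ← Nat.and_assoc, h15 (c &&& n) (lt_of_le_of_lt (Nat.and_le_left) hc)]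

lemma pv_nat1 (b n : Nat) (hb : b < 16) :
    b - (b &&& n) = (if n &&& 1 = 0 then b &&& 1 else 0) + (if n &&& 2 = 0 then b &&& 2 else 0)
      + (if n &&& 4 = 0 then b &&& 4 else 0) + (if n &&& 8 = 0 then b &&& 8 else 0) := by
  have c1 : n &&& 1 = (n % 16) &&& 1 := by
    rw [Nat.and_comm n 1, pv_and_small 1 n (by norm_num), Nat.and_comm]
  have c2 : n &&& 2 = (n % 16) &&& 2 := by
    rw [Nat.and_comm n 2, pv_and_small 2 n (by norm_num), Nat.and_comm]
  have c4 : n &&& 4 = (n % 16) &&& 4 := by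
    rw [Nat.and_comm n 4, pv_and_small 4 n (by norm_num), Nat.and_comm]
  have c8 : n &&& 8 = (n % 16) &&& 8 := by
    rw [Nat.and_comm n 8, pv_and_small 8 n (by norm_num), Nat.and_comm]
  rw [pv_and_small b n hb, c1, c2, c4, c8]
  have hr : n % 16 < 16 := Nat.mod_lt _ (by norm_num)
  set r := n % 16 with hrdef
  clear_value r
  interval_cases b <;> interval_cases r <;> decide

lemma pv_nat2 (b m : Nat) (hb : b < 16) :
    b &&& m = (if 1 - (1 &&& m) = 0 then b &&& 1 else 0) + (if 2 - (2 &&& m) = 0 then b &&& 2 else 0)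
      + (if 4 - (4 &&& m) = 0 then b &&& 4 else 0) + (if 8 - (8 &&& m) = 0 then b &&& 8 else 0) := by
  have c1 : 1 &&& m = 1 &&& (m % 16) := pv_and_small 1 m (by norm_num)
  have c2 : 2 &&& m = 2 &&& (m % 16) := pv_and_small 2 m (by norm_num)
  have c4 : 4 &&& m = 4 &&& (m % 16) := pv_and_small 4 m (by norm_num)
  have c8 : 8 &&& m = 8 &&& (m % 16) := pv_and_small 8 m (by norm_num)
  rw [pv_and_small b m hb, c1, c2, c4, c8]
  have hr : m % 16 < 16 := Nat.mod_lt _ (by norm_num)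
  set r := m % 16 with hrdef
  clear_value r
  interval_cases b <;> interval_cases r <;> decide


lemma pv_not (v : Int) : Int.not v = -v - 1 := by
  cases v with
  | ofNat n => simp [Int.not, Int.negSucc_eq]; ring
  | negSucc n => simp [Int.not, Int.negSucc_eq]

lemma pv_mask_eq (v B : Int) (h0 : 0 ≤ B) (hB : B < 16) :
    PySem.Int.band B (Int.not v) =
      (if PySem.Int.band v 1 == 0 then PySem.Int.band B 1 else 0)
      + (if PySem.Int.band v 2 == 0 then PySem.Int.band B 2 else 0)
      + (if PySem.Int.band v 4 == 0 then PySem.Int.band B 4 else 0)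
      + (if PySem.Int.band v 8 == 0 then PySem.Int.band B 8 else 0) := by
  obtain ⟨b, rfl⟩ : ∃ b : Nat, B = (b : Int) := ⟨B.toNat, (Int.toNat_of_nonneg h0).symm⟩
  have hb : b < 16 := by exact_mod_cast hB
  have hBc : ∀ c : Int, 0 ≤ c → PySem.Int.band (b:Int) c = ((b &&& c.toNat : Nat) : Int) := by
    intro c hc; rw [PySem.Int.band_of_nonneg (by positivity) hc]; simp
  rw [pv_not]
  rcases (by omega : 0 ≤ v ∨ v < 0) with hv | hv
  · obtain ⟨n, rfl⟩ : ∃ n : Nat, v = (n : Int) := ⟨v.toNat, (Int.toNat_of_nonneg hv).symm⟩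
    have hband : PySem.Int.band (b:Int) (-(n:Int) - 1) = ((b - (b &&& n) : Nat) : Int) := by
      simp only [PySem.Int.band]
      rw [if_pos (by positivity), if_neg (by omega)]
      have h2 : (-(-(n:Int) - 1) - 1) = (n:Int) := by ring
      rw [h2]; simp
    have hcond : ∀ c : Int, 0 ≤ c → (PySem.Int.band (n:Int) c == 0) = ((n &&& c.toNat == 0) : Bool) := by
      intro c hc; rw [PySem.Int.band_of_nonneg (by positivity) hc]; simp
    rw [hband, hcond 1 (by norm_num), hcond 2 (by norm_num), hcond 4 (by norm_num), hcond 8 (by norm_num),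
        hBc 1 (by norm_num), hBc 2 (by norm_num), hBc 4 (by norm_num), hBc 8 (by norm_num)]
    norm_num
    rw [pv_nat1 b n hb]
    push_cast [apply_ite (fun k : Nat => (k : Int))]
    simp
  · obtain ⟨m, rfl⟩ : ∃ m : Nat, v = -(m:Int) - 1 := by
      refine ⟨(-v-1).toNat, ?_⟩
      have := Int.toNat_of_nonneg (show (0:Int) ≤ -v-1 by omega)
      omega
    have hnotv : (-(-(m:Int) - 1) - 1) = (m:Int) := by ring
    rw [hnotv]
    have hband : PySem.Int.band (b:Int) (m:Int) = ((b &&& m : Nat) : Int) := by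
      rw [PySem.Int.band_of_nonneg (by positivity) (by positivity)]; simp
    have hcond : ∀ c : Int, 0 ≤ c →
        (PySem.Int.band (-(m:Int) - 1) c == 0) = ((c.toNat - (c.toNat &&& m) == 0) : Bool) := by
      intro c hc
      simp only [PySem.Int.band]
      rw [if_neg (by omega), if_pos hc]
      have h2 : (-(-(m:Int) - 1) - 1) = (m:Int) := by ring
      rw [h2]; simp
    rw [hband, hcond 1 (by norm_num), hcond 2 (by norm_num), hcond 4 (by norm_num), hcond 8 (by norm_num),
        hBc 1 (by norm_num), hBc 2 (by norm_num), hBc 4 (by norm_num), hBc 8 (by norm_num)]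
    norm_num
    rw [pv_nat2 b m hb]
    push_cast [apply_ite (fun k : Nat => (k : Int))]
    simp

lemma pv_s3 : (1:Int) <<< 3 = 8 := by decide
lemma pv_s1 : (1:Int) <<< 1 = 2 := by decide
lemma pv_s2 : (1:Int) <<< 2 = 4 := by decide
lemma pv_z3 : (0:Int) <<< 3 = 0 := by decide
lemma pv_z1 : (0:Int) <<< 1 = 0 := by decide
lemma pv_z2 : (0:Int) <<< 2 = 0 := by decide

lemma pv_map_if (c : Prop) [Decidable c] (f : (Int × Int) → (Int × Int)) (e : Int × Int) :
    List.map f (if c then [e] else []) = (if c then [f e] else []) := by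
  split_ifs <;> simp

lemma pv_bnd_1_1 : PySem.Int.band 1 1 = 1 := by decide
lemma pv_bnd_1_2 : PySem.Int.band 1 2 = 0 := by decide
lemma pv_bnd_1_4 : PySem.Int.band 1 4 = 0 := by decide
lemma pv_bnd_1_8 : PySem.Int.band 1 8 = 0 := by decide
lemma pv_bnd_2_1 : PySem.Int.band 2 1 = 0 := by decide
lemma pv_bnd_2_2 : PySem.Int.band 2 2 = 2 := by decide
lemma pv_bnd_2_4 : PySem.Int.band 2 4 = 0 := by decide
lemma pv_bnd_2_8 : PySem.Int.band 2 8 = 0 := by decide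
lemma pv_bnd_3_1 : PySem.Int.band 3 1 = 1 := by decide
lemma pv_bnd_3_2 : PySem.Int.band 3 2 = 2 := by decide
lemma pv_bnd_3_4 : PySem.Int.band 3 4 = 0 := by decide
lemma pv_bnd_3_8 : PySem.Int.band 3 8 = 0 := by decide
lemma pv_bnd_4_1 : PySem.Int.band 4 1 = 0 := by decide
lemma pv_bnd_4_2 : PySem.Int.band 4 2 = 0 := by decide
lemma pv_bnd_4_4 : PySem.Int.band 4 4 = 4 := by decide
lemma pv_bnd_4_8 : PySem.Int.band 4 8 = 0 := by decide
lemma pv_bnd_5_1 : PySem.Int.band 5 1 = 1 := by decide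
lemma pv_bnd_5_2 : PySem.Int.band 5 2 = 0 := by decide
lemma pv_bnd_5_4 : PySem.Int.band 5 4 = 4 := by decide
lemma pv_bnd_5_8 : PySem.Int.band 5 8 = 0 := by decide
lemma pv_bnd_6_1 : PySem.Int.band 6 1 = 0 := by decide
lemma pv_bnd_6_2 : PySem.Int.band 6 2 = 2 := by decide
lemma pv_bnd_6_4 : PySem.Int.band 6 4 = 4 := by decide
lemma pv_bnd_6_8 : PySem.Int.band 6 8 = 0 := by decide
lemma pv_bnd_7_1 : PySem.Int.band 7 1 = 1 := by decide
lemma pv_bnd_7_2 : PySem.Int.band 7 2 = 2 := by decide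
lemma pv_bnd_7_4 : PySem.Int.band 7 4 = 4 := by decide
lemma pv_bnd_7_8 : PySem.Int.band 7 8 = 0 := by decide
lemma pv_bnd_8_1 : PySem.Int.band 8 1 = 0 := by decide
lemma pv_bnd_8_2 : PySem.Int.band 8 2 = 0 := by decide
lemma pv_bnd_8_4 : PySem.Int.band 8 4 = 0 := by decide
lemma pv_bnd_8_8 : PySem.Int.band 8 8 = 8 := by decide
lemma pv_bnd_9_1 : PySem.Int.band 9 1 = 1 := by decide
lemma pv_bnd_9_2 : PySem.Int.band 9 2 = 0 := by decide
lemma pv_bnd_9_4 : PySem.Int.band 9 4 = 0 := by decide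
lemma pv_bnd_9_8 : PySem.Int.band 9 8 = 8 := by decide
lemma pv_bnd_10_1 : PySem.Int.band 10 1 = 0 := by decide
lemma pv_bnd_10_2 : PySem.Int.band 10 2 = 2 := by decide
lemma pv_bnd_10_4 : PySem.Int.band 10 4 = 0 := by decide
lemma pv_bnd_10_8 : PySem.Int.band 10 8 = 8 := by decide
lemma pv_bnd_11_1 : PySem.Int.band 11 1 = 1 := by decide
lemma pv_bnd_11_2 : PySem.Int.band 11 2 = 2 := by decide
lemma pv_bnd_11_4 : PySem.Int.band 11 4 = 0 := by decide
lemma pv_bnd_11_8 : PySem.Int.band 11 8 = 8 := by decide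
lemma pv_bnd_12_1 : PySem.Int.band 12 1 = 0 := by decide
lemma pv_bnd_12_2 : PySem.Int.band 12 2 = 0 := by decide
lemma pv_bnd_12_4 : PySem.Int.band 12 4 = 4 := by decide
lemma pv_bnd_12_8 : PySem.Int.band 12 8 = 8 := by decide
lemma pv_bnd_13_1 : PySem.Int.band 13 1 = 1 := by decide
lemma pv_bnd_13_2 : PySem.Int.band 13 2 = 0 := by decide
lemma pv_bnd_13_4 : PySem.Int.band 13 4 = 4 := by decide
lemma pv_bnd_13_8 : PySem.Int.band 13 8 = 8 := by decide
lemma pv_bnd_14_1 : PySem.Int.band 14 1 = 0 := by decide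
lemma pv_bnd_14_2 : PySem.Int.band 14 2 = 2 := by decide
lemma pv_bnd_14_4 : PySem.Int.band 14 4 = 4 := by decide
lemma pv_bnd_14_8 : PySem.Int.band 14 8 = 8 := by decide
lemma pv_bnd_15_1 : PySem.Int.band 15 1 = 1 := by decide
lemma pv_bnd_15_2 : PySem.Int.band 15 2 = 2 := by decide
lemma pv_bnd_15_4 : PySem.Int.band 15 4 = 4 := by decide
lemma pv_bnd_15_8 : PySem.Int.band 15 8 = 8 := by decide
lemma pv_wall_fold (grid : List (List Int)) (x y : Int) :
    ((PySem.List.pyGet? grid y).bind (fun row => PySem.List.pyGet? row x)).getD 0 = pvWall grid x y := rfl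
lemma pv_am1 (a : Int) : a + -1 = a - 1 := by ring

lemma pv_B_char (grid : List (List Int)) (x y width height : Int) :
    get_accessible_neighbors_alt grid (x, y) width height =
      (if x > 0 then (if PySem.Int.band (pvWall grid x y) 8 == 0 then [(x - 1, y)] else []) else [])
      ++ (if x < width - 1 then (if PySem.Int.band (pvWall grid x y) 2 == 0 then [(x + 1, y)] else []) else [])
      ++ (if y > 0 then (if PySem.Int.band (pvWall grid x y) 1 == 0 then [(x, y - 1)] else []) else [])
      ++ (if y < height - 1 then (if PySem.Int.band (pvWall grid x y) 4 == 0 then [(x, y + 1)] else []) else []) := by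
  unfold get_accessible_neighbors_alt
  by_cases h1 : x > 0 <;> by_cases h2 : x < width - 1 <;> by_cases h3 : y > 0 <;> by_cases h4 : y < height - 1 <;>
    simp only [h1, h2, h3, h4, if_true, if_false, pv_s3, pv_s1, pv_s2, pv_z3, pv_z1, pv_z2] <;>
    simp [PySem.Int.bor, pv_wall_fold] <;>
    (try rw [pv_mask_eq _ _ (by norm_num) (by norm_num)]) <;>
    (try rw [pv_open_sum]) <;>
    simp [pv_map_if, pv_am1, pv_bnd_1_1, pv_bnd_1_2, pv_bnd_1_4, pv_bnd_1_8, pv_bnd_2_1, pv_bnd_2_2, pv_bnd_2_4, pv_bnd_2_8, pv_bnd_3_1, pv_bnd_3_2, pv_bnd_3_4, pv_bnd_3_8, pv_bnd_4_1, pv_bnd_4_2, pv_bnd_4_4, pv_bnd_4_8, pv_bnd_5_1, pv_bnd_5_2, pv_bnd_5_4, pv_bnd_5_8, pv_bnd_6_1, pv_bnd_6_2, pv_bnd_6_4, pv_bnd_6_8, pv_bnd_7_1, pv_bnd_7_2, pv_bnd_7_4, pv_bnd_7_8, pv_bnd_8_1, pv_bnd_8_2, pv_bnd_8_4, pv_bnd_8_8,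 pv_bnd_9_1, pv_bnd_9_2, pv_bnd_9_4, pv_bnd_9_8, pv_bnd_10_1, pv_bnd_10_2, pv_bnd_10_4, pv_bnd_10_8, pv_bnd_11_1, pv_bnd_11_2, pv_bnd_11_4, pv_bnd_11_8, pv_bnd_12_1, pv_bnd_12_2, pv_bnd_12_4, pv_bnd_12_8, pv_bnd_13_1, pv_bnd_13_2, pv_bnd_13_4, pv_bnd_13_8, pv_bnd_14_1, pv_bnd_14_2, pv_bnd_14_4, pv_bnd_14_8, pv_bnd_15_1, pv_bnd_15_2, pv_bnd_15_4, pv_bnd_15_8]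

-- ===== VERDICT (by name: the statement is the Claim_ definition above) =====
theorem get_accessible_neighbors_spec : Claim_equal_get_accessible_neighbors := by
  intro grid cell width height _ _
  obtain ⟨x, y⟩ := cell
  show get_accessible_neighbors grid (x, y) width height = get_accessible_neighbors_alt grid (x, y) width height
  rw [pv_A_char, pv_B_char]
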